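-- pv_equiv track=rewrite | github.com/LinXueyuanStdio/LaTeX_OCR_PRO | model/evaluation/text.py | truncate_end
-- ===== SOURCE A (Python) =====
-- def truncate_end(list_of_ids, id_end):
--     """Removes the end of the list starting from the first id_end token"""
--     list_trunc = []
--     for idx in list_of_ids:
--         if idx == id_end:
--             break
--         else:
--             list_trunc.append(idx)
--
--     return list_trunc
-- ===== SOURCE B (Python) =====
-- def truncate_end(list_of_ids, id_end):
--     """Removes the end of the list starting from the first id_end token"""
--     try:
--         cut = list_of_ids.index(id_end)
--     except ValueError:
--         return list(list_of_ids)
--     return list(list_of_ids[:cut])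
-- ===== Notes on version B (the rewrite author's own statement) =====
-- stated objective: simpler
-- what changed: Replaced the element-by-element append loop with early break by a locate-then-slice: find the first index of id_end and return the slice before it, or a copy of the whole list if absent.
import Mathlib
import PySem

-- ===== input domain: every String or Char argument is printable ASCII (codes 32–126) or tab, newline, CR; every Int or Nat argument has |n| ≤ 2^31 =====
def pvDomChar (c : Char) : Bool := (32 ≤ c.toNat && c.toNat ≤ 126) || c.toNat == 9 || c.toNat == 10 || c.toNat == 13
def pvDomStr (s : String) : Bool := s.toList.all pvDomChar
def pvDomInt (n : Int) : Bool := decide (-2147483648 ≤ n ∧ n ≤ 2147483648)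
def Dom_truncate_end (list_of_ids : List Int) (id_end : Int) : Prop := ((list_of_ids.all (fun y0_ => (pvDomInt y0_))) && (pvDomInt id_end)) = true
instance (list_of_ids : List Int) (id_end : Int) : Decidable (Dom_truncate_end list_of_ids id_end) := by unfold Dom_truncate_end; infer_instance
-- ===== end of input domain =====

-- B replaces A's append-with-break loop by a locate-then-slice decomposition (simpler).

-- ===== PORT A =====
-- the for-loop with break: recurse over the list, appending until id_end is met
def truncate_end_loop (list_of_ids : List Int) (id_end : Int) (list_trunc : List Int) : List Int :=
  match list_of_ids with
  | [] => list_trunc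
  | idx :: rest =>
    if idx == id_end then list_trunc
    else truncate_end_loop rest id_end (list_trunc ++ [idx])

def truncate_end (list_of_ids : List Int) (id_end : Int) : List Int :=
  truncate_end_loop list_of_ids id_end []

-- ===== PORT B =====
def truncate_end_alt (list_of_ids : List Int) (id_end : Int) : List Int :=
  match PySem.List.index? list_of_ids id_end with
  | none => list_of_ids
  | some cut => PySem.List.slice list_of_ids none (some (cut : Int))

-- ===== PRECONDITION & SPEC =====
def Spec_truncate_end (list_of_ids : List Int) (id_end : Int) (out : List Int) : Prop := out = truncate_end_alt list_of_ids id_end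
instance (list_of_ids : List Int) (id_end : Int) (out : List Int) : Decidable (Spec_truncate_end list_of_ids id_end out) := by unfold Spec_truncate_end; infer_instance

-- ===== CLAIM (what is proved, stated in full; the proofs are below) =====
def Claim_equal_truncate_end : Prop := ∀ (list_of_ids : List Int) (id_end : Int), Dom_truncate_end list_of_ids id_end → Spec_truncate_end list_of_ids id_end (truncate_end list_of_ids id_end)

-- ===== LEMMAS AND PROOFS =====
theorem truncate_end_loop_acc (list_of_ids : List Int) (id_end : Int) (acc : List Int) :
    truncate_end_loop list_of_ids id_end acc = acc ++ truncate_end_loop list_of_ids id_end [] := by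
  induction list_of_ids generalizing acc with
  | nil => simp [truncate_end_loop]
  | cons x xs ih =>
    by_cases h : x = id_end
    · simp [truncate_end_loop, h]
    · simp only [truncate_end_loop, beq_iff_eq, if_neg h]
      rw [ih (acc ++ [x]), ih ([] ++ [x])]
      simp [List.append_assoc]

theorem truncate_end_eq_alt (list_of_ids : List Int) (id_end : Int) :
    truncate_end list_of_ids id_end = truncate_end_alt list_of_ids id_end := by
  induction list_of_ids with
  | nil => rfl
  | cons x xs ih =>
    by_cases h : x = id_end
    · subst h
      simp [truncate_end, truncate_end_loop, truncate_end_alt,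
        PySem.List.index?_eq_idxOf?, List.idxOf?_cons, PySem.List.slice]
    · simp only [truncate_end, truncate_end_loop, beq_iff_eq, if_neg h]
      rw [truncate_end_loop_acc]
      have h' : x ≠ id_end := h
      simp only [truncate_end_alt, PySem.List.index?_cons_of_ne xs h']
      cases hi : PySem.List.index? xs id_end with
      | none =>
        simp only [Option.map]
        have := ih
        simp only [truncate_end, truncate_end_alt, hi] at this
        simp [this]
      | some i =>
        simp only [Option.map]
        have := ih
        simp only [truncate_end, truncate_end_alt, hi] at this
        rw [this]
        rw [PySem.List.slice_to_natCast, PySem.List.slice_to_natCast]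
        simp [List.take_succ_cons]

-- ===== VERDICT =====
theorem truncate_end_spec : Claim_equal_truncate_end := by
  intro l e _
  exact truncate_end_eq_alt l e
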